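-- pv_equiv track=rewrite | github.com/jianhui-ben/leetcode_python | 14. Longest Common Prefix.py | common_between_two
-- ===== SOURCE A (Python) =====
-- def common_between_two(str1, str2):
--     if len(str1)!=0 and len(str2)!=0:
--         #head, tail= str1, str1
--         head= str1
--         while len(head)!=0:
--             if str2.find(head)!=-1:
--                 return head
--             #if str2.find(tail)!=-1:
--             #    return tail
--             head= head[0:len(head)-1]
--             #tail= tail[1:len(tail)]
--     return ''
-- ===== SOURCE B (Python) =====
-- def common_between_two(str1, str2):
--     # Binary search on prefix length: "prefix of length k occurs in str2" is
--     # monotone in k, so the longest such prefix is found in O(log n) checks.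
--     lo, hi = 0, len(str1)
--     while lo < hi:
--         mid = (lo + hi + 1) // 2
--         if str1[:mid] in str2:
--             lo = mid
--         else:
--             hi = mid - 1
--     return str1[:lo]
-- ===== Notes on version B (the rewrite author's own statement) =====
-- stated objective: faster
-- what changed: Replaces A's longest-first linear scan over all prefixes (each checked by substring search) with a binary search on the prefix length, exploiting that 'prefix of length k occurs in str2' is monotone in k.
import Mathlib
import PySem

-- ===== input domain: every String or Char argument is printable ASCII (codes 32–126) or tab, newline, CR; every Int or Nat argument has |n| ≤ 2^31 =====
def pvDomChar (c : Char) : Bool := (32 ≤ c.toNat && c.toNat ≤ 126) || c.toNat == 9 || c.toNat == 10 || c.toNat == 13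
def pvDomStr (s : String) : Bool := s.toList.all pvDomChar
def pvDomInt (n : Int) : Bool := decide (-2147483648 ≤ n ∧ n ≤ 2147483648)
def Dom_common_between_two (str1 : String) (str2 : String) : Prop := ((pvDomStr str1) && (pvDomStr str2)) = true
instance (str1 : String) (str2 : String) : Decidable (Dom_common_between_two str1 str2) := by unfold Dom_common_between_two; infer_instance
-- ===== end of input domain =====

-- B replaces A's longest-first linear scan over prefixes with a binary search on the
-- prefix length (the "prefix of length k occurs in str2" property is monotone in k).

-- ===== PORT A =====
-- the while loop: head shrinks by one char from the right until found or empty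
-- (head[0:len(head)-1] = take (len-1), exact since the bounds are nonnegative)
def pvLoopA (l2 : List Char) (head : List Char) : List Char :=
  if head = [] then []
  else if PySem.Chars.find l2 head ≠ -1 then head
  else pvLoopA l2 (head.take (head.length - 1))
termination_by head.length
decreasing_by
  simp only [List.length_take]
  rename_i h _
  have : head.length ≠ 0 := by simpa using (List.length_pos_of_ne_nil (by exact h)).ne'
  omega

def common_between_two (str1 : String) (str2 : String) : String :=
  if str1.toList.length ≠ 0 ∧ str2.toList.length ≠ 0 then
    String.mk (pvLoopA str2.toList str1.toList)
  else ""

-- ===== PORT B =====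
-- binary search over [lo, hi] for the largest k with str1[:k] a substring of str2
def pvLoopB (l1 l2 : List Char) (lo hi : Nat) : List Char :=
  if lo < hi then
    let mid := (lo + hi + 1) / 2
    if PySem.Chars.isIn (l1.take mid) l2 then pvLoopB l1 l2 mid hi
    else pvLoopB l1 l2 lo (mid - 1)
  else l1.take lo
termination_by hi - lo
decreasing_by all_goals omega

def common_between_two_alt (str1 : String) (str2 : String) : String :=
  String.mk (pvLoopB str1.toList str2.toList 0 str1.toList.length)

-- ===== PRECONDITION & SPEC =====
def Spec_common_between_two (str1 : String) (str2 : String) (out : String) : Prop := out = common_between_two_alt str1 str2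
instance (str1 : String) (str2 : String) (out : String) : Decidable (Spec_common_between_two str1 str2 out) := by unfold Spec_common_between_two; infer_instance

-- ===== CLAIM (what is proved, stated in full; the proofs are below) =====
def Claim_equal_common_between_two : Prop := ∀ (str1 : String) (str2 : String), Dom_common_between_two str1 str2 → Spec_common_between_two str1 str2 (common_between_two str1 str2)

-- ===== LEMMAS AND PROOFS =====

-- monotonicity: if the length-k prefix occurs in l2 then so does every shorter prefix
theorem pv_P_mono (l1 l2 : List Char) {j k : Nat} (hjk : j ≤ k)
    (h : l1.take k <:+: l2) : l1.take j <:+: l2 := by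
  have hp : l1.take j <+: l1.take k := by
    simpa [List.take_take, Nat.min_eq_left hjk] using List.take_prefix j (l1.take k)
  exact hp.isInfix.trans h

-- A's loop returns the longest prefix (of the current head = l1.take m) occurring in l2
theorem pv_specA (l2 l1 : List Char) :
    ∀ m, m ≤ l1.length →
      ∃ k, pvLoopA l2 (l1.take m) = l1.take k ∧ k ≤ m ∧ l1.take k <:+: l2 ∧
        ∀ j, j ≤ m → l1.take j <:+: l2 → j ≤ k := by
  intro m
  induction m using Nat.strong_induction_on with
  | _ m ih =>
    intro hm
    rw [pvLoopA]
    by_cases h0 : l1.take m = []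
    · have hm0 : m = 0 := by
        rcases List.take_eq_nil_iff.mp h0 with h | h
        · exact h
        · subst h; simpa using hm
      subst hm0
      refine ⟨0, by simp [h0], le_refl _, by simp, ?_⟩
      intro j hj _; omega
    · have hmpos : 0 < m := by
        by_contra h; push_neg at h
        exact h0 (by simp [Nat.le_zero.mp h])
      simp only [h0, if_false]
      by_cases hf : PySem.Chars.find l2 (l1.take m) ≠ -1
      · rw [if_pos hf]
        exact ⟨m, rfl, le_refl _, (PySem.Chars.find_ne_neg_one_iff _ _).mp hf, fun j hj _ => hj⟩
      · rw [if_neg hf]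
        have hlen : (l1.take m).length = m := by
          simp [Nat.min_eq_left hm]
        have hrw : (l1.take m).take ((l1.take m).length - 1) = l1.take (m - 1) := by
          rw [hlen, List.take_take, Nat.min_eq_left (by omega)]
        rw [hrw]
        obtain ⟨k, hk, hkm, hP, hmax⟩ := ih (m - 1) (by omega) (by omega)
        push_neg at hf
        have hnotPm : ¬ l1.take m <:+: l2 := (PySem.Chars.find_eq_neg_one_iff _ _).mp hf
        refine ⟨k, hk, by omega, hP, ?_⟩
        intro j hj hPj
        rcases Nat.lt_or_ge j m with hlt | hge
        · exact hmax j (by omega) hPj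
        · exact absurd (by rwa [Nat.le_antisymm hj hge] at hPj) hnotPm

-- B's binary search returns the longest prefix of l1 occurring in l2
theorem pv_specB (l1 l2 : List Char) :
    ∀ fuel lo hi, hi - lo ≤ fuel → lo ≤ hi → hi ≤ l1.length → l1.take lo <:+: l2 →
      (∀ j, j ≤ l1.length → l1.take j <:+: l2 → j ≤ hi) →
      ∃ k, pvLoopB l1 l2 lo hi = l1.take k ∧ k ≤ l1.length ∧ l1.take k <:+: l2 ∧
        ∀ j, j ≤ l1.length → l1.take j <:+: l2 → j ≤ k := by
  intro fuel
  induction fuel with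
  | zero =>
    intro lo hi hfuel hle hhi hPlo hmax
    have : lo = hi := by omega
    subst this
    rw [pvLoopB]
    simp only [lt_irrefl, if_false]
    exact ⟨lo, rfl, hhi, hPlo, hmax⟩
  | succ f ihf =>
    intro lo hi hfuel hle hhi hPlo hmax
    rw [pvLoopB]
    by_cases hlt : lo < hi
    · simp only [hlt, if_true]
      by_cases hin : PySem.Chars.isIn (l1.take ((lo + hi + 1) / 2)) l2 = true
      · simp only [hin, if_true]
        exact ihf ((lo + hi + 1) / 2) hi (by omega) (by omega) hhi
          ((PySem.Chars.isIn_iff_infix _ _).mp hin) hmax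
      · rw [if_neg (by simpa using hin)]
        have hnot : ¬ l1.take ((lo + hi + 1) / 2) <:+: l2 := by
          intro h; exact hin ((PySem.Chars.isIn_iff_infix _ _).mpr h)
        refine ihf lo ((lo + hi + 1) / 2 - 1) (by omega) ?_ (by omega) hPlo ?_
        · by_contra hc; push_neg at hc
          exact hnot (pv_P_mono l1 l2 (by omega) hPlo)
        · intro j hj hPj
          by_contra hc; push_neg at hc
          exact hnot (pv_P_mono l1 l2 (by omega) hPj)
    · simp only [hlt, if_false]
      have : lo = hi := by omega
      subst this
      exact ⟨lo, rfl, hhi, hPlo, hmax⟩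

-- ===== VERDICT (by name: the statement is the Claim_ definition above) =====
theorem common_between_two_spec : Claim_equal_common_between_two := by
  intro str1 str2 _
  unfold Spec_common_between_two common_between_two common_between_two_alt
  set l1 := str1.toList with hl1
  set l2 := str2.toList with hl2
  obtain ⟨kB, hB, hkBn, hPB, hmaxB⟩ :=
    pv_specB l1 l2 l1.length 0 l1.length (by omega) (by omega) (le_refl _)
      (by simp) (fun j hj _ => hj)
  rw [hB]
  by_cases hg : l1.length ≠ 0 ∧ l2.length ≠ 0
  · rw [if_pos hg]
    obtain ⟨kA, hA, hkAn, hPA, hmaxA⟩ := pv_specA l2 l1 l1.length (le_refl _)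
    rw [List.take_length] at hA
    rw [hA]
    have hAB : kA = kB :=
      Nat.le_antisymm (hmaxB kA hkAn hPA) (hmaxA kB hkBn hPB)
    rw [hAB]
  · rw [if_neg hg]
    push_neg at hg
    by_cases h1 : l1.length = 0
    · have : l1 = [] := List.length_eq_zero_iff.mp h1
      rw [this, List.take_nil]; rfl
    · have h2 : l2 = [] := List.length_eq_zero_iff.mp (hg h1)
      have : l1.take kB = [] := by
        rw [h2] at hPB
        simpa using hPB
      rw [this]; rfl
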